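-- pv_equiv track=rewrite | github.com/sue-zadeh/python-test | test 1.py | solution
-- ===== SOURCE A (Python) =====
-- def solution(a, b):
--       a_digits =[]
--       for i in range (len (a)):
--           a_digits = a_digits +[ord(a[i]) - ord('0')]
--       b_digits = []
--       for i in range(len(b)):
--           b_digits = b_digits + [ord(b[i]) - ord('0')]
--       if len(a_digits) > len(b_digits):
--           max_len = len(a_digits)
--       else:
--           max_len = len(b_digits)
--       result =""
--       for i in range(1, max_len + 1):
--           digita = 0
--           digitb = 0
--           if len(a_digits) - i>= 0:
--               digita = a_digits[len(a_digits)- i]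
--           if len(b_digits) -i >= 0:
--             digitb = b_digits[len(b_digits)- i]
--           total = digita + digitb
--           if total >= 10:
--               result = result + chr(ord('0') + (total % 10))
--               result = result +chr(ord('0') + (total // 10))
--           else:
--               result = result + chr(ord('0') + total)
--       final = ''
--       for i in range(len(result)-1, -1, -1):
--         final = final + result[i]
--       return final
-- ===== SOURCE B (Python) =====
-- def solution(a, b):
--     da = [ord(c) - ord('0') for c in a]
--     db = [ord(c) - ord('0') for c in b]
--     n = max(len(da), len(db))
--     da = [0] * (n - len(da)) + da
--     db = [0] * (n - len(db)) + db
--     out = []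
--     for x, y in zip(da, db):
--         t = x + y
--         if t < 10:
--             out.append(chr(ord('0') + t))
--         else:
--             out.append(chr(ord('0') + t // 10) + chr(ord('0') + t % 10))
--     return ''.join(out)
-- ===== Notes on version B (the rewrite author's own statement) =====
-- stated objective: simpler
-- what changed: B left-pads both digit lists to equal length once and emits each column's chunk most-significant-first in a single forward pass, eliminating A's per-character list rebuilding (a_digits = a_digits + [...]), its units-before-tens append order and its whole-string reversal loop.
import Mathlib
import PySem

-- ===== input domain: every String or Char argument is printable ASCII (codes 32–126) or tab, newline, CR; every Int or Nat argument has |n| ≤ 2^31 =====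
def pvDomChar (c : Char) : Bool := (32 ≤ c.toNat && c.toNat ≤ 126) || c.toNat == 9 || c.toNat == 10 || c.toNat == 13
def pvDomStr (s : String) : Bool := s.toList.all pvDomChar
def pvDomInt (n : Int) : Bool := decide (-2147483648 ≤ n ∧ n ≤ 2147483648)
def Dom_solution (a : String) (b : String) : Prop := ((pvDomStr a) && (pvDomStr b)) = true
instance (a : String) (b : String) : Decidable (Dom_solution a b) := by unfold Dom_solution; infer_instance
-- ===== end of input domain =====

-- B builds the output in its final orientation in one pass over the left-zero-padded digit columns,
-- replacing A's units-before-tens insertion and whole-string reversal loop (objective: simpler).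

-- ===== PORT A =====
def solution (a : String) (b : String) : String :=
  let aDigits : List Int := a.toList.foldl (fun acc c => acc ++ [(c.toNat : Int) - 48]) []
  let bDigits : List Int := b.toList.foldl (fun acc c => acc ++ [(c.toNat : Int) - 48]) []
  let maxLen : Int := if aDigits.length > bDigits.length then (aDigits.length : Int) else (bDigits.length : Int)
  let result : List Char :=
    (PySem.List.pyRange 1 (maxLen + 1) 1).foldl (fun res i =>
      let digita : Int := if (aDigits.length : Int) - i ≥ 0 then PySem.List.pyGetD aDigits ((aDigits.length : Int) - i) 0 else 0
      let digitb : Int := if (bDigits.length : Int) - i ≥ 0 then PySem.List.pyGetD bDigits ((bDigits.length : Int) - i) 0 else 0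
      let total := digita + digitb
      if total ≥ 10 then
        (res ++ [Char.ofNat (48 + PySem.Int.mod total 10).toNat]) ++ [Char.ofNat (48 + PySem.Int.floordiv total 10).toNat]
      else
        res ++ [Char.ofNat (48 + total).toNat]) []
  let final : List Char :=
    (PySem.List.pyRange ((result.length : Int) - 1) (-1) (-1)).foldl
      (fun f i => f ++ [PySem.List.pyGetD result i ' ']) []
  String.ofList final

-- ===== PORT B =====
def solution_alt (a : String) (b : String) : String :=
  let da : List Int := a.toList.map (fun c => (c.toNat : Int) - 48)
  let db : List Int := b.toList.map (fun c => (c.toNat : Int) - 48)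
  let n : Nat := max da.length db.length
  let pa : List Int := List.replicate (n - da.length) 0 ++ da
  let pb : List Int := List.replicate (n - db.length) 0 ++ db
  let out : List Char := (pa.zip pb).flatMap (fun xy =>
    let t := xy.1 + xy.2
    if t < 10 then [Char.ofNat (48 + t).toNat]
    else [Char.ofNat (48 + PySem.Int.floordiv t 10).toNat, Char.ofNat (48 + PySem.Int.mod t 10).toNat])
  String.ofList out

-- ===== PRECONDITION & SPEC =====
-- Pre_ excludes exactly the inputs where some right-aligned column has character codes summing below 48
-- (e.g. a tab paired with a space): there Python's chr(ord('0') + total) gets a negative argument and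
-- A raises ValueError (B's join loop raises there too).
def Pre_solution (a : String) (b : String) : Prop :=
  ∀ p ∈ a.toList.reverse.zip b.toList.reverse, 48 ≤ p.1.toNat + p.2.toNat
instance (a : String) (b : String) : Decidable (Pre_solution a b) := by unfold Pre_solution; infer_instance
def pvWitness_solution : String × String := ("123", "45")

def Spec_solution (a : String) (b : String) (out : String) : Prop := out = solution_alt a b
instance (a : String) (b : String) (out : String) : Decidable (Spec_solution a b out) := by unfold Spec_solution; infer_instance

-- ===== CLAIM (what is proved, stated in full; the proofs are below) =====
def Claim_equal_solution : Prop := ∀ (a : String) (b : String), Dom_solution a b → Pre_solution a b → Spec_solution a b (solution a b)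

-- ===== LEMMAS AND PROOFS =====

/-- The digit A's loop reads for column `i` (counted from 1 at the right end). -/
def pvDig (xs : List Int) (i : Int) : Int :=
  if (xs.length : Int) - i ≥ 0 then PySem.List.pyGetD xs ((xs.length : Int) - i) 0 else 0

/-- A's per-column chunk, units digit first (the order A appends in). -/
def pvChunkL (t : Int) : List Char :=
  if t ≥ 10 then
    [Char.ofNat (48 + PySem.Int.mod t 10).toNat, Char.ofNat (48 + PySem.Int.floordiv t 10).toNat]
  else [Char.ofNat (48 + t).toNat]

/-- B's per-column chunk, most significant first. -/
def pvChunkM (t : Int) : List Char :=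
  if t < 10 then [Char.ofNat (48 + t).toNat]
  else [Char.ofNat (48 + PySem.Int.floordiv t 10).toNat, Char.ofNat (48 + PySem.Int.mod t 10).toNat]

theorem pvChunkL_reverse (t : Int) : (pvChunkL t).reverse = pvChunkM t := by
  unfold pvChunkL pvChunkM
  rcases lt_or_ge t 10 with h | h
  · rw [if_neg (by omega), if_pos h]; rfl
  · rw [if_pos h, if_neg (by omega)]; rfl

/-- A's final reversal loop (a map after the loop-shape rewrite) is `List.reverse`. -/
theorem pvRevLoop (l : List Char) :
    (PySem.List.pyRange ((l.length : Int) - 1) (-1) (-1)).map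
      (fun i => PySem.List.pyGetD l i ' ') = l.reverse := by
  have h : ((l.length : Int) - 1) + 1 = PySem.List.len l := by simp [PySem.List.len_eq]
  rw [PySem.List.pyRange_neg_one_eq_reverse, (by omega : (-1 : Int) + 1 = 0), h,
    List.map_reverse, PySem.List.map_pyGetD_pyRange_zero]

/-- the padded list of B reads, at position `j`, exactly the digit A reads for column `n - j`. -/
theorem pvPadElem (xs : List Int) (n j : Nat) (hle : xs.length ≤ n) (hj : j < n) :
    (List.replicate (n - xs.length) (0:Int) ++ xs)[j]'(by simp; omega) = pvDig xs ((n : Int) - j) := by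
  unfold pvDig
  by_cases h : j < n - xs.length
  · rw [List.getElem_append_left (by simpa using h), if_neg (by omega)]
    simp
  · rw [List.getElem_append_right (by simp; omega), if_pos (by omega),
      PySem.List.pyGetD_eq_getElem _ _ (by omega) (by omega)]
    congr 1
    simp only [List.length_replicate]
    omega

theorem pvMain (da db : List Int) :
    (List.flatMap (fun i => pvChunkL (pvDig da i + pvDig db i))
        (PySem.List.pyRange 1 ((max da.length db.length : Nat) + 1) 1)).reverse
      = List.flatMap (fun xy => pvChunkM (xy.1 + xy.2))
          ((List.replicate (max da.length db.length - da.length) (0:Int) ++ da).zip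
           (List.replicate (max da.length db.length - db.length) (0:Int) ++ db)) := by
  set n := max da.length db.length with hn
  have hpa : (List.replicate (n - da.length) (0:Int) ++ da)
      = (List.range n).map (fun (k : Nat) => pvDig da ((n : Int) - (k : Int))) := by
    apply List.ext_getElem
    · simp; omega
    · intro j h1 h2
      rw [List.getElem_map, List.getElem_range]
      exact pvPadElem da n j (by omega) (by simp at h1; omega)
  have hpb : (List.replicate (n - db.length) (0:Int) ++ db)
      = (List.range n).map (fun (k : Nat) => pvDig db ((n : Int) - (k : Int))) := by
    apply List.ext_getElem
    · simp; omega
    · intro j h1 h2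
      rw [List.getElem_map, List.getElem_range]
      exact pvPadElem db n j (by omega) (by simp at h1; omega)
  rw [hpa, hpb, List.zip_map', List.flatMap_map]
  rw [List.reverse_flatMap]
  have hr : (PySem.List.pyRange 1 ((n : Int) + 1) 1).reverse
      = (List.range n).map (fun (k : Nat) => (n : Int) - (k : Int)) := by
    have h0 : (PySem.List.pyRange 1 ((n : Int) + 1)).reverse = PySem.List.pyRange (n : Int) 0 (-1) := by
      rw [PySem.List.pyRange_neg_one_eq_reverse]; norm_num
    rw [h0, PySem.List.pyRange_neg_one]
    simp
  rw [hr, List.flatMap_map]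
  apply List.flatMap_congr  -- may not exist; fallback below
  intro k _
  simp [Function.comp, pvChunkL_reverse]

/-- A's column loop, as a flatMap of per-column chunks. -/
theorem pvFold (da db : List Int) (m : Int) :
    (PySem.List.pyRange 1 (m + 1) 1).foldl (fun res i =>
      let digita : Int := if (da.length : Int) - i ≥ 0 then PySem.List.pyGetD da ((da.length : Int) - i) 0 else 0
      let digitb : Int := if (db.length : Int) - i ≥ 0 then PySem.List.pyGetD db ((db.length : Int) - i) 0 else 0
      let total := digita + digitb
      if total ≥ 10 then
        (res ++ [Char.ofNat (48 + PySem.Int.mod total 10).toNat]) ++ [Char.ofNat (48 + PySem.Int.floordiv total 10).toNat]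
      else
        res ++ [Char.ofNat (48 + total).toNat]) []
    = (PySem.List.pyRange 1 (m + 1) 1).flatMap (fun i => pvChunkL (pvDig da i + pvDig db i)) := by
  have h : (fun (res : List Char) (i : Int) =>
      let digita : Int := if (da.length : Int) - i ≥ 0 then PySem.List.pyGetD da ((da.length : Int) - i) 0 else 0
      let digitb : Int := if (db.length : Int) - i ≥ 0 then PySem.List.pyGetD db ((db.length : Int) - i) 0 else 0
      let total := digita + digitb
      if total ≥ 10 then
        (res ++ [Char.ofNat (48 + PySem.Int.mod total 10).toNat]) ++ [Char.ofNat (48 + PySem.Int.floordiv total 10).toNat]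
      else
        res ++ [Char.ofNat (48 + total).toNat])
      = fun res i => res ++ pvChunkL (pvDig da i + pvDig db i) := by
    funext res i
    simp only [pvChunkL, pvDig]
    split_ifs <;> simp
  rw [h, PySem.List.foldl_append_eq_flatMap, List.nil_append]

-- ===== VERDICT (by name: the statement is the Claim_ definition above) =====
theorem solution_spec : Claim_equal_solution := by
  intro a b _ _
  simp only [Spec_solution, solution, solution_alt,
    PySem.List.foldl_append_singleton_eq_map, List.nil_append]
  set da := a.toList.map (fun c => (c.toNat : Int) - 48) with hda
  set db := b.toList.map (fun c => (c.toNat : Int) - 48) with hdb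
  have hmax : (if da.length > db.length then (da.length : Int) else (db.length : Int))
      = ((max da.length db.length : Nat) : Int) := by
    split_ifs <;> push_cast <;> omega
  rw [hmax, pvFold, pvRevLoop]
  exact congrArg String.ofList (pvMain da db)
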